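-- pv_equiv track=rewrite | github.com/Rudrash42/dstn_project_grp10 | run_experiments.py | build_multiturn_prompts
-- ===== SOURCE A (Python) =====
-- EXP4_BASE_HISTORY = "User: Hello AI.\nAssistant: Hi there! How can I help you today?\n"
--
-- EXP4_QUESTIONS = [
--     "Can you explain how the RehabQuest pose tracking works in detail?",
--     "What is the calibration procedure used at the start of each session?",
--     "How does the T-pose calibration normalise body proportions across different patients?",
--     "What are the hardware requirements for real-time pose tracking?",
--     "How does the MediaPipe holistic model detect the 33 pose landmarks?",
--     "What is the role of cosine similarity in computing joint angles?",
--     "How are joint angles computed in three dimensions using vector mathematics?",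
--     "How is the system validated against the Vicon motion capture gold standard?",
--     "What accuracy metrics are used to evaluate pose tracking performance?",
--     "How does camera distance affect the accuracy of landmark detection?",
--     "What is the minimum GPU specification needed for real-time processing?",
--     "How does the system handle occlusion when body parts are partially hidden?",
--     "What frame rate is required to achieve clinically acceptable motion tracking?",
--     "How are left and right side landmarks differentiated in the holistic model?",
--     "What happens if the T-pose calibration is performed incorrectly?",
--     "How does the system account for varying patient heights and limb lengths?",
--     "Can the pose tracking work with a standard RGB webcam or does it need depth sensors?",
--     "How are the 33 landmarks mapped to anatomical joint definitions?",
--     "What filtering or smoothing is applied to raw landmark coordinates?",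
--     "How does the system detect and reject outlier frames during a session?",
--     "How is shoulder flexion angle specifically calculated from landmark vectors?",
--     "How is knee extension range of motion extracted from the landmark data?",
--     "What is the typical latency from movement to on-screen feedback?",
--     "How does lighting condition affect landmark detection confidence scores?",
--     "What confidence threshold is used to accept or reject a detected landmark?",
--     "How does the system track spinal alignment and posture during exercises?",
--     "How are exercise repetitions counted from the joint angle time series?",
--     "What machine learning model underlies the MediaPipe pose estimator?",
--     "How was the MediaPipe model trained and what datasets were used?",
--     "Can the system distinguish between correct and compensatory movement patterns?",
--     "How is data from multiple sessions stored and compared over time?",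
--     "What data format is used to export session results for clinician review?",
--     "How does the system perform on patients with limb prosthetics or assistive devices?",
--     "What are the known failure modes of the cosine similarity angle computation?",
--     "How is the world coordinate frame defined relative to the camera?",
--     "How does the system handle patients who cannot perform the initial T-pose?",
--     "What is the mean absolute error reported against the Vicon gold standard?",
--     "How does body-worn clothing affect the accuracy of landmark detection?",
--     "Can multiple cameras be used simultaneously to improve tracking accuracy?",
--     "How are upper and lower extremity exercises treated differently in the pipeline?",
--     "What happens to tracking accuracy when the patient moves out of the camera frame?",
--     "How is the skeleton model re-initialised after a tracking loss event?",
--     "How are hip joint angles computed and which landmarks are used?",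
--     "What is the difference between 2D and 3D landmark coordinates in MediaPipe?",
--     "How does the system calculate symmetry scores between left and right sides?",
--     "What network architecture is used for the pose landmark regression?",
--     "How are progress reports generated from accumulated session data?",
--     "Can the system operate offline without an internet connection?",
--     "How is patient privacy protected when storing video and landmark data?",
--     "What are the planned future improvements to the pose tracking pipeline?",
-- ]
--
-- def build_multiturn_prompts(max_turns=None):
--     """
--     Build a list of prompts where each successive prompt contains the
--     entire conversation history up to that point.
--     """
--     turns = EXP4_QUESTIONS if max_turns is None else EXP4_QUESTIONS[:max_turns]
--     prompts = []
--     history = EXP4_BASE_HISTORY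
--     for i, question in enumerate(turns, 1):
--         history += f"User: {question}\n"
--         history += f"Assistant: Here is my detailed answer for turn {i}.\n"
--         prompts.append(history + f"User: Can you elaborate further on: {question}")
--     return prompts
-- ===== SOURCE B (Python) =====
-- EXP4_BASE_HISTORY = "User: Hello AI.\nAssistant: Hi there! How can I help you today?\n"
--
-- EXP4_QUESTIONS = [
--     "Can you explain how the RehabQuest pose tracking works in detail?",
--     "What is the calibration procedure used at the start of each session?",
--     "How does the T-pose calibration normalise body proportions across different patients?",
--     "What are the hardware requirements for real-time pose tracking?",
--     "How does the MediaPipe holistic model detect the 33 pose landmarks?",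
--     "What is the role of cosine similarity in computing joint angles?",
--     "How are joint angles computed in three dimensions using vector mathematics?",
--     "How is the system validated against the Vicon motion capture gold standard?",
--     "What accuracy metrics are used to evaluate pose tracking performance?",
--     "How does camera distance affect the accuracy of landmark detection?",
--     "What is the minimum GPU specification needed for real-time processing?",
--     "How does the system handle occlusion when body parts are partially hidden?",
--     "What frame rate is required to achieve clinically acceptable motion tracking?",
--     "How are left and right side landmarks differentiated in the holistic model?",
--     "What happens if the T-pose calibration is performed incorrectly?",
--     "How does the system account for varying patient heights and limb lengths?",
--     "Can the pose tracking work with a standard RGB webcam or does it need depth sensors?",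
--     "How are the 33 landmarks mapped to anatomical joint definitions?",
--     "What filtering or smoothing is applied to raw landmark coordinates?",
--     "How does the system detect and reject outlier frames during a session?",
--     "How is shoulder flexion angle specifically calculated from landmark vectors?",
--     "How is knee extension range of motion extracted from the landmark data?",
--     "What is the typical latency from movement to on-screen feedback?",
--     "How does lighting condition affect landmark detection confidence scores?",
--     "What confidence threshold is used to accept or reject a detected landmark?",
--     "How does the system track spinal alignment and posture during exercises?",
--     "How are exercise repetitions counted from the joint angle time series?",
--     "What machine learning model underlies the MediaPipe pose estimator?",
--     "How was the MediaPipe model trained and what datasets were used?",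
--     "Can the system distinguish between correct and compensatory movement patterns?",
--     "How is data from multiple sessions stored and compared over time?",
--     "What data format is used to export session results for clinician review?",
--     "How does the system perform on patients with limb prosthetics or assistive devices?",
--     "What are the known failure modes of the cosine similarity angle computation?",
--     "How is the world coordinate frame defined relative to the camera?",
--     "How does the system handle patients who cannot perform the initial T-pose?",
--     "What is the mean absolute error reported against the Vicon gold standard?",
--     "How does body-worn clothing affect the accuracy of landmark detection?",
--     "Can multiple cameras be used simultaneously to improve tracking accuracy?",
--     "How are upper and lower extremity exercises treated differently in the pipeline?",
--     "What happens to tracking accuracy when the patient moves out of the camera frame?",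
--     "How is the skeleton model re-initialised after a tracking loss event?",
--     "How are hip joint angles computed and which landmarks are used?",
--     "What is the difference between 2D and 3D landmark coordinates in MediaPipe?",
--     "How does the system calculate symmetry scores between left and right sides?",
--     "What network architecture is used for the pose landmark regression?",
--     "How are progress reports generated from accumulated session data?",
--     "Can the system operate offline without an internet connection?",
--     "How is patient privacy protected when storing video and landmark data?",
--     "What are the planned future improvements to the pose tracking pipeline?",
-- ]
--
-- def build_multiturn_prompts(max_turns=None):
--     """Stateless rebuild: per-turn blocks once, then each prompt is a slice-join
--     of the blocks prefix -- no running history accumulator."""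
--     turns = EXP4_QUESTIONS if max_turns is None else EXP4_QUESTIONS[:max_turns]
--     blocks = [f"User: {q}\nAssistant: Here is my detailed answer for turn {i}.\n"
--               for i, q in enumerate(turns, 1)]
--     return [EXP4_BASE_HISTORY + "".join(blocks[:i + 1])
--             + f"User: Can you elaborate further on: {q}"
--             for i, q in enumerate(turns)]
-- ===== Notes on version B (the rewrite author's own statement) =====
-- stated objective: alternative
-- what changed: A threads a mutable running `history` string through the loop; B is stateless: it builds the per-turn blocks once and forms each prompt as base + ''.join of a blocks prefix slice, with no accumulator.
import Mathlib
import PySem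

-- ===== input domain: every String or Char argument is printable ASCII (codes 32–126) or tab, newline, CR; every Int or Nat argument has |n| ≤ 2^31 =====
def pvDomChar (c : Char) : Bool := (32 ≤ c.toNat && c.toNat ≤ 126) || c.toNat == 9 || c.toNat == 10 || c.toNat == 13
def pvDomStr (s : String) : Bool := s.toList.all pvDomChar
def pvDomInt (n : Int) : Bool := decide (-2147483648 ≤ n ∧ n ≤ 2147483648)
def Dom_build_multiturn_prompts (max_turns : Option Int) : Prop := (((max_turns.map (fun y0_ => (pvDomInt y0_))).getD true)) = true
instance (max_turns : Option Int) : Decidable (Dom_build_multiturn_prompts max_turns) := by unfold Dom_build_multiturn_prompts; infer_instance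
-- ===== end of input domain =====

-- B replaces A's running-history accumulator by a stateless per-turn rebuild
-- (per-turn blocks built once, each prompt = base + join of a blocks prefix): objective 'alternative'.

def pvBaseHistory : String := "User: Hello AI.\nAssistant: Hi there! How can I help you today?\n"

def pvQuestions : List String := [
  "Can you explain how the RehabQuest pose tracking works in detail?",
  "What is the calibration procedure used at the start of each session?",
  "How does the T-pose calibration normalise body proportions across different patients?",
  "What are the hardware requirements for real-time pose tracking?",
  "How does the MediaPipe holistic model detect the 33 pose landmarks?",
  "What is the role of cosine similarity in computing joint angles?",
  "How are joint angles computed in three dimensions using vector mathematics?",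
  "How is the system validated against the Vicon motion capture gold standard?",
  "What accuracy metrics are used to evaluate pose tracking performance?",
  "How does camera distance affect the accuracy of landmark detection?",
  "What is the minimum GPU specification needed for real-time processing?",
  "How does the system handle occlusion when body parts are partially hidden?",
  "What frame rate is required to achieve clinically acceptable motion tracking?",
  "How are left and right side landmarks differentiated in the holistic model?",
  "What happens if the T-pose calibration is performed incorrectly?",
  "How does the system account for varying patient heights and limb lengths?",
  "Can the pose tracking work with a standard RGB webcam or does it need depth sensors?",
  "How are the 33 landmarks mapped to anatomical joint definitions?",
  "What filtering or smoothing is applied to raw landmark coordinates?",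
  "How does the system detect and reject outlier frames during a session?",
  "How is shoulder flexion angle specifically calculated from landmark vectors?",
  "How is knee extension range of motion extracted from the landmark data?",
  "What is the typical latency from movement to on-screen feedback?",
  "How does lighting condition affect landmark detection confidence scores?",
  "What confidence threshold is used to accept or reject a detected landmark?",
  "How does the system track spinal alignment and posture during exercises?",
  "How are exercise repetitions counted from the joint angle time series?",
  "What machine learning model underlies the MediaPipe pose estimator?",
  "How was the MediaPipe model trained and what datasets were used?",
  "Can the system distinguish between correct and compensatory movement patterns?",
  "How is data from multiple sessions stored and compared over time?",
  "What data format is used to export session results for clinician review?",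
  "How does the system perform on patients with limb prosthetics or assistive devices?",
  "What are the known failure modes of the cosine similarity angle computation?",
  "How is the world coordinate frame defined relative to the camera?",
  "How does the system handle patients who cannot perform the initial T-pose?",
  "What is the mean absolute error reported against the Vicon gold standard?",
  "How does body-worn clothing affect the accuracy of landmark detection?",
  "Can multiple cameras be used simultaneously to improve tracking accuracy?",
  "How are upper and lower extremity exercises treated differently in the pipeline?",
  "What happens to tracking accuracy when the patient moves out of the camera frame?",
  "How is the skeleton model re-initialised after a tracking loss event?",
  "How are hip joint angles computed and which landmarks are used?",
  "What is the difference between 2D and 3D landmark coordinates in MediaPipe?",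
  "How does the system calculate symmetry scores between left and right sides?",
  "What network architecture is used for the pose landmark regression?",
  "How are progress reports generated from accumulated session data?",
  "Can the system operate offline without an internet connection?",
  "How is patient privacy protected when storing video and landmark data?",
  "What are the planned future improvements to the pose tracking pipeline?"
]

-- ===== PORT A =====
-- A's loop: running `history` string, one prompt appended per turn (enumerate(turns, 1)).
def pvLoopA : List (Int × String) → String → List String
  | [], _ => []
  | (i, q) :: rest, history =>
    let h := history ++ ("User: " ++ q ++ "\n")
        ++ ("Assistant: Here is my detailed answer for turn " ++ PySem.Int.toStr i ++ ".\n")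
    (h ++ ("User: Can you elaborate further on: " ++ q)) :: pvLoopA rest h

def build_multiturn_prompts (max_turns : Option Int) : List String :=
  let turns := match max_turns with
    | none => pvQuestions
    | some m => PySem.List.slice pvQuestions none (some m)
  pvLoopA (PySem.List.enumerate turns 1) pvBaseHistory

-- ===== PORT B =====
-- Source B's per-turn block f-string.
def pvBlock (p : Int × String) : String :=
  "User: " ++ p.2 ++ "\nAssistant: Here is my detailed answer for turn " ++ PySem.Int.toStr p.1 ++ ".\n"

def build_multiturn_prompts_alt (max_turns : Option Int) : List String :=
  let turns := match max_turns with
    | none => pvQuestions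
    | some m => PySem.List.slice pvQuestions none (some m)
  let blocks := (PySem.List.enumerate turns 1).map pvBlock
  (PySem.List.enumerate turns 0).map (fun p =>
    pvBaseHistory ++ PySem.Str.join "" (PySem.List.slice blocks none (some (p.1 + 1)))
      ++ ("User: Can you elaborate further on: " ++ p.2))

-- ===== PRECONDITION & SPEC =====
def Spec_build_multiturn_prompts (max_turns : Option Int) (out : List String) : Prop := out = build_multiturn_prompts_alt max_turns
instance (max_turns : Option Int) (out : List String) : Decidable (Spec_build_multiturn_prompts max_turns out) := by unfold Spec_build_multiturn_prompts; infer_instance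

-- ===== CLAIM (what is proved, stated in full; the proofs are below) =====
def Claim_equal_build_multiturn_prompts : Prop := ∀ (max_turns : Option Int), Dom_build_multiturn_prompts max_turns → Spec_build_multiturn_prompts max_turns (build_multiturn_prompts max_turns)

-- ===== LEMMAS AND PROOFS =====

theorem pv_join_empty_nil : PySem.Str.join "" ([] : List String) = "" := by decide

theorem pv_join_empty_cons (b : String) (l : List String) :
    PySem.Str.join "" (b :: l) = b ++ PySem.Str.join "" l := by
  cases l with
  | nil => simp [PySem.Str.join, PySem.Chars.join, List.intercalate]
  | cons c rest =>
    show String.ofList ([].intercalate (b.toList :: c.toList :: List.map String.toList rest)) = _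
    rw [show ([].intercalate (b.toList :: c.toList :: List.map String.toList rest))
          = b.toList ++ [].intercalate (c.toList :: List.map String.toList rest) by
        simp [List.intercalate]]
    simp [PySem.Str.join, PySem.Chars.join, String.ofList_append]

-- A's two += pieces concatenate to B's single block string.
theorem pv_hist (base q : String) (i : Int) :
    base ++ ("User: " ++ q ++ "\n")
      ++ ("Assistant: Here is my detailed answer for turn " ++ PySem.Int.toStr i ++ ".\n")
      = base ++ pvBlock (i, q) := by
  simp only [pvBlock, String.append_assoc]
  rw [show ("\n" ++ ("Assistant: Here is my detailed answer for turn " ++ (PySem.Int.toStr i ++ ".\n")))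
        = ("\nAssistant: Here is my detailed answer for turn " ++ (PySem.Int.toStr i ++ ".\n")) by
      rw [← String.append_assoc]; rfl]

theorem pv_key (qs : List String) (i : Int) (base : String) :
    pvLoopA (PySem.List.enumerate qs (i + 1)) base =
    (PySem.List.enumerate qs i).map (fun p =>
      base ++ PySem.Str.join "" (PySem.List.slice ((PySem.List.enumerate qs (i + 1)).map pvBlock) none (some (p.1 - i + 1)))
        ++ ("User: Can you elaborate further on: " ++ p.2)) := by
  induction qs generalizing i base with
  | nil => simp [PySem.List.enumerate, pvLoopA]
  | cons q rest ih =>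
    rw [PySem.List.enumerate_cons, PySem.List.enumerate_cons]
    show (_ :: _) = _
    rw [List.map_cons]
    congr 1
    · -- head
      rw [show i - i + 1 = (1 : Int) by ring]
      rw [PySem.List.slice_to _ (by omega : (0:Int) ≤ 1)]
      simp only [List.map_cons, Int.toNat_one, List.take_succ_cons, List.take_zero]
      rw [pv_join_empty_cons, pv_join_empty_nil, String.append_empty, pv_hist]
    · -- tail
      rw [show i + 1 + 1 = (i + 1) + 1 by ring]
      rw [ih (i + 1) (base ++ ("User: " ++ q ++ "\n")
        ++ ("Assistant: Here is my detailed answer for turn " ++ PySem.Int.toStr (i + 1) ++ ".\n"))]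
      apply List.map_congr_left
      intro p hp
      obtain ⟨k, hk, hpk⟩ := (PySem.List.mem_enumerate_iff _ _ _).mp hp
      subst hpk
      simp only
      rw [pv_hist]
      rw [show (i + 1 + (k : Int)) - (i + 1) + 1 = (k : Int) + 1 by ring]
      rw [show (i + 1 + (k : Int)) - i + 1 = (k : Int) + 2 by ring]
      rw [PySem.List.slice_to _ (by omega : (0:Int) ≤ (k : Int) + 1)]
      rw [PySem.List.slice_to _ (by omega : (0:Int) ≤ (k : Int) + 2)]
      rw [show ((k : Int) + 1).toNat = k + 1 by omega]
      rw [show ((k : Int) + 2).toNat = k + 2 by omega]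
      rw [List.map_cons, List.take_succ_cons, pv_join_empty_cons]
      simp only [String.append_assoc]

-- ===== VERDICT (by name: the statement is the Claim_ definition above) =====
theorem build_multiturn_prompts_spec : Claim_equal_build_multiturn_prompts := by
  intro max_turns _
  show build_multiturn_prompts max_turns = build_multiturn_prompts_alt max_turns
  unfold build_multiturn_prompts build_multiturn_prompts_alt
  cases max_turns with
  | none =>
    simpa using pv_key pvQuestions 0 pvBaseHistory
  | some m =>
    simpa using pv_key (PySem.List.slice pvQuestions none (some m)) 0 pvBaseHistory
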